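-- pv_equiv track=rewrite | github.com/Ahmahsamara17/vmdbg | test_vmdbg.py | _parse_dump_flags
-- ===== SOURCE A (Python) =====
-- def _parse_dump_flags(arg, default_count=20, default_unit="g", default_fmt="x"):
--
--     arg = (arg or "").strip()
--     if not arg or not arg.startswith("/"):
--         return default_count, default_unit, default_fmt
--
--     spec = arg[1:].strip().split()[0] if len(arg) > 1 else ""
--     units = {"b": 1, "h": 2, "w": 4, "g": 8}
--     formats = {"x", "d", "u", "f", "c"}
--
--     count_str = ""
--     unit = None
--     fmt = None
--
--     for ch in spec:
--         if ch.isdigit() and unit is None and fmt is None: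
--             count_str += ch
--         elif ch in units and unit is None:
--             unit = ch
--         elif ch in formats and fmt is None:
--             fmt = ch
--         else:
--             continue
--
--     try:
--         count = int(count_str) if count_str else default_count
--         if count <= 0:
--             count = default_count
--     except ValueError:
--         count = default_count
--
--     if unit is None:
--         unit = default_unit
--     if fmt is None:
--         fmt = default_fmt
--
--     return count, unit, fmt
-- ===== SOURCE B (Python) =====
-- def _parse_dump_flags(arg, default_count=20, default_unit="g", default_fmt="x"):
--     arg = (arg or "").strip()
--     if not arg or not arg.startswith("/"):
--         return default_count, default_unit, default_fmt
--
--     spec = arg[1:].strip().split()[0] if len(arg) > 1 else ""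
--     units = "bhwg"
--     formats = "xdufc"
--
--     # three independent scans instead of a state machine
--     unit = next((c for c in spec if c in units), None)
--     fmt = next((c for c in spec if c in formats), None)
--     boundary = next((i for i, c in enumerate(spec) if c in units or c in formats), len(spec))
--     count_str = "".join(c for c in spec[:boundary] if c.isdigit())
--
--     count = int(count_str) if count_str else default_count
--     if count <= 0:
--         count = default_count
--     return count, unit if unit is not None else default_unit, fmt if fmt is not None else default_fmt
-- ===== Notes on version B (the rewrite author's own statement) =====
-- stated objective: simpler
-- what changed: Replaces A's single-pass state machine (mutable count_str/unit/fmt with branch order) by three independent declarative scans: first unit char, first format char, and digits before the earliest unit-or-format position; the try/except disappears since count_str is digits-only.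
import Mathlib
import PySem

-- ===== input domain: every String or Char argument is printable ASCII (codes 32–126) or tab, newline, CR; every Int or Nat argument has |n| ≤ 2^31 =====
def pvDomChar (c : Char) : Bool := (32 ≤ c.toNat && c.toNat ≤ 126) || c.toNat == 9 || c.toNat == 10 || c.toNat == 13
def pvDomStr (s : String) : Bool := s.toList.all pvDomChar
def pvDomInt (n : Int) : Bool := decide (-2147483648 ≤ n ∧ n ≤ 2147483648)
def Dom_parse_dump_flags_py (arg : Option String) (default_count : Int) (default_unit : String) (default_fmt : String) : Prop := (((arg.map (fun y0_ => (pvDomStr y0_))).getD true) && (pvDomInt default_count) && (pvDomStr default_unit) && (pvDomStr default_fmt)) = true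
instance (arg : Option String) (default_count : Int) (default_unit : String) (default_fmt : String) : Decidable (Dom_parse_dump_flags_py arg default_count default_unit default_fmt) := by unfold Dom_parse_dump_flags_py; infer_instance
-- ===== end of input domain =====

-- B replaces A's state-machine loop by three independent scans (first unit char, first format char,
-- digits before the earliest special position); objective: simpler, same complexity.

-- ch in {"b": 1, "h": 2, "w": 4, "g": 8}
def pvIsUnit (c : Char) : Bool := c == 'b' || c == 'h' || c == 'w' || c == 'g'
-- ch in {"x", "d", "u", "f", "c"}
def pvIsFmt (c : Char) : Bool := c == 'x' || c == 'd' || c == 'u' || c == 'f' || c == 'c'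

-- ===== PORT A =====
-- one step of A's for-loop over spec, state = (count_str, unit, fmt)
def pvStepA (s : List Char × Option Char × Option Char) (ch : Char) : List Char × Option Char × Option Char :=
  if PySem.Chars.isdigit ch && s.2.1.isNone && s.2.2.isNone then (s.1 ++ [ch], s.2.1, s.2.2)
  else if pvIsUnit ch && s.2.1.isNone then (s.1, some ch, s.2.2)
  else if pvIsFmt ch && s.2.2.isNone then (s.1, s.2.1, some ch)
  else s

def parse_dump_flags_py (arg : Option String) (default_count : Int) (default_unit : String) (default_fmt : String) : Int × String × String :=
  let argS := PySem.Chars.strip (arg.getD "").toList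
  if argS.isEmpty || !(PySem.Chars.startswith argS ['/']) then (default_count, default_unit, default_fmt)
  else
    -- arg[1:].strip().split()[0]: split() is provably nonempty here (arg is stripped and len > 1), so headD's default is unreachable
    let spec := if argS.length > 1 then (PySem.Chars.split₀ (PySem.Chars.strip (argS.drop 1))).headD [] else []
    let st := spec.foldl pvStepA ([], none, none)
    -- try: int(count_str) — count_str is all digits, so the ValueError default is unreachable
    let count0 : Int := if st.1.isEmpty then default_count else (PySem.Int.ofChars? st.1).getD default_count
    let count := if count0 ≤ 0 then default_count else count0
    (count,
     match st.2.1 with | some c => String.ofList [c] | none => default_unit,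
     match st.2.2 with | some c => String.ofList [c] | none => default_fmt)

-- ===== PORT B =====
def parse_dump_flags_py_alt (arg : Option String) (default_count : Int) (default_unit : String) (default_fmt : String) : Int × String × String :=
  let argS := PySem.Chars.strip (arg.getD "").toList
  if argS.isEmpty || !(PySem.Chars.startswith argS ['/']) then (default_count, default_unit, default_fmt)
  else
    let spec := if argS.length > 1 then (PySem.Chars.split₀ (PySem.Chars.strip (argS.drop 1))).headD [] else []
    let unit := spec.find? pvIsUnit
    let fmt := spec.find? pvIsFmt
    let boundary := (spec.findIdx? (fun c => pvIsUnit c || pvIsFmt c)).getD spec.length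
    let count_str := (spec.take boundary).filter PySem.Chars.isdigit
    -- int(count_str): count_str is all digits, cannot raise; the getD default is unreachable
    let count0 : Int := if count_str.isEmpty then default_count else (PySem.Int.ofChars? count_str).getD default_count
    let count := if count0 ≤ 0 then default_count else count0
    (count,
     match unit with | some c => String.ofList [c] | none => default_unit,
     match fmt with | some c => String.ofList [c] | none => default_fmt)

-- ===== PRECONDITION & SPEC =====
def Spec_parse_dump_flags_py (arg : Option String) (default_count : Int) (default_unit : String) (default_fmt : String) (out : Int × String × String) : Prop := out = parse_dump_flags_py_alt arg default_count default_unit default_fmt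
instance (arg : Option String) (default_count : Int) (default_unit : String) (default_fmt : String) (out : Int × String × String) : Decidable (Spec_parse_dump_flags_py arg default_count default_unit default_fmt out) := by unfold Spec_parse_dump_flags_py; infer_instance

-- ===== CLAIM (what is proved, stated in full; the proofs are below) =====
def Claim_equal_parse_dump_flags_py : Prop := ∀ (arg : Option String) (default_count : Int) (default_unit : String) (default_fmt : String), Dom_parse_dump_flags_py arg default_count default_unit default_fmt → Spec_parse_dump_flags_py arg default_count default_unit default_fmt (parse_dump_flags_py arg default_count default_unit default_fmt)

-- ===== LEMMAS AND PROOFS =====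

lemma pv_digit_not_unit (c : Char) (h : PySem.Chars.isdigit c = true) : pvIsUnit c = false := by
  simp only [pvIsUnit, Bool.or_eq_false_iff, beq_eq_false_iff_ne]
  refine ⟨⟨⟨?_, ?_⟩, ?_⟩, ?_⟩ <;> rintro rfl <;> exact absurd h (by decide)

lemma pv_digit_not_fmt (c : Char) (h : PySem.Chars.isdigit c = true) : pvIsFmt c = false := by
  simp only [pvIsFmt, Bool.or_eq_false_iff, beq_eq_false_iff_ne]
  refine ⟨⟨⟨⟨?_, ?_⟩, ?_⟩, ?_⟩, ?_⟩ <;> rintro rfl <;> exact absurd h (by decide)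

lemma pv_unit_not_fmt (c : Char) (h : pvIsUnit c = true) : pvIsFmt c = false := by
  simp only [pvIsUnit, Bool.or_eq_true, beq_iff_eq] at h
  rcases h with ((rfl | rfl) | rfl) | rfl <;> decide

lemma pv_loop_eq (l : List Char) : ∀ (cs : List Char) (u f : Option Char),
    l.foldl pvStepA (cs, u, f) =
      (cs ++ (if u.isNone && f.isNone then
         (l.take ((l.findIdx? (fun c => pvIsUnit c || pvIsFmt c)).getD l.length)).filter PySem.Chars.isdigit
       else []),
       (match u with | some a => some a | none => l.find? pvIsUnit),
       (match f with | some a => some a | none => l.find? pvIsFmt)) := by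
  induction l with
  | nil => intro cs u f; cases u <;> cases f <;> simp
  | cons c t ih =>
    intro cs u f
    by_cases hd : PySem.Chars.isdigit c
    · have hu := pv_digit_not_unit c hd
      have hf := pv_digit_not_fmt c hd
      cases u <;> cases f <;>
        simp only [List.foldl_cons, pvStepA, hd, hu, hf, Option.isNone_none, Option.isNone_some,
          Bool.and_true, Bool.and_false, Bool.true_and, Bool.false_and, if_true, if_false,
          Bool.false_or, Bool.true_or, ite_true, ite_false, ih, List.find?_cons,
          List.findIdx?_cons, Bool.not_true, Bool.not_false] <;>
        try rfl
      all_goals cases hidx : t.findIdx? (fun c => pvIsUnit c || pvIsFmt c) <;>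
        simp [hidx, hd, List.filter_cons, List.take_succ_cons]
    · replace hd : PySem.Chars.isdigit c = false := by simpa using hd
      by_cases hu : pvIsUnit c
      · have hf := pv_unit_not_fmt c hu
        cases u <;> cases f <;>
          simp only [List.foldl_cons, pvStepA, hd, hu, hf, Option.isNone_none, Option.isNone_some,
            Bool.and_true, Bool.and_false, Bool.true_and, Bool.false_and, if_true, if_false,
            Bool.false_or, Bool.true_or, ite_true, ite_false, ih, List.find?_cons,
            List.findIdx?_cons, Bool.not_true, Bool.not_false] <;>
          try rfl
      · by_cases hf : pvIsFmt c <;> cases u <;> cases f <;>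
          simp only [List.foldl_cons, pvStepA, hd, hu, hf, Option.isNone_none, Option.isNone_some,
            Bool.and_true, Bool.and_false, Bool.true_and, Bool.false_and, if_true, if_false,
            Bool.false_or, Bool.true_or, Bool.or_self, ite_true, ite_false, ih, List.find?_cons,
            List.findIdx?_cons, Bool.not_true, Bool.not_false] <;>
          try rfl
        all_goals cases hidx : t.findIdx? (fun c => pvIsUnit c || pvIsFmt c) <;>
          simp [hidx, hd, List.filter_cons, List.take_succ_cons]

-- ===== VERDICT (by name: the statement is the Claim_ definition above) =====
theorem parse_dump_flags_py_spec : Claim_equal_parse_dump_flags_py := by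
  intro arg dc du df _
  unfold Spec_parse_dump_flags_py parse_dump_flags_py parse_dump_flags_py_alt
  simp only []
  split
  · rfl
  · rw [pv_loop_eq]
    rfl
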